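-- pv_equiv track=rewrite | github.com/hello3984/dripzy.app | backend/app/modules/outfit/services/outfit_service.py | _standardize_category
-- ===== SOURCE A (Python) =====
-- def _standardize_category(category: str) -> str:
--     """Standardize category names for better search results."""
--     category = category.lower()
--
--     if any(word in category for word in ["top", "shirt", "blouse", "sweater", "sweatshirt", "t-shirt", "tee", "tank"]):
--         return "Top"
--     elif any(word in category for word in ["bottom", "pant", "jean", "short", "skirt", "trouser"]):
--         return "Bottom"
--     elif any(word in category for word in ["dress", "gown", "jumpsuit", "romper"]):
--         return "Dress"
--     elif any(word in category for word in ["shoe", "sneaker", "boot", "heel", "sandal", "slipper", "loafer"]):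
--         return "Shoes"
--     elif any(word in category for word in ["jacket", "coat", "blazer", "outerwear"]):
--         return "Outerwear"
--     elif any(word in category for word in ["accessory", "jewelry", "watch", "bag", "purse", "scarf", "hat", "belt"]):
--         return "Accessory"
--     else:
--         return "Other"
-- ===== SOURCE B (Python) =====
-- _KEYWORDS = [
--     ("top", 0), ("shirt", 0), ("blouse", 0), ("sweater", 0), ("sweatshirt", 0),
--     ("t-shirt", 0), ("tee", 0), ("tank", 0),
--     ("bottom", 1), ("pant", 1), ("jean", 1), ("short", 1), ("skirt", 1), ("trouser", 1),
--     ("dress", 2), ("gown", 2), ("jumpsuit", 2), ("romper", 2),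
--     ("shoe", 3), ("sneaker", 3), ("boot", 3), ("heel", 3), ("sandal", 3),
--     ("slipper", 3), ("loafer", 3),
--     ("jacket", 4), ("coat", 4), ("blazer", 4), ("outerwear", 4),
--     ("accessory", 5), ("jewelry", 5), ("watch", 5), ("bag", 5), ("purse", 5),
--     ("scarf", 5), ("hat", 5), ("belt", 5),
-- ]
-- _LABELS = ["Top", "Bottom", "Dress", "Shoes", "Outerwear", "Accessory"]
--
-- def _standardize_category(category: str) -> str:
--     # Single left-to-right scan over the text: at each position, prefix-match
--     # every keyword and keep the minimal category priority seen anywhere.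
--     text = category.lower()
--     best = 6
--     for i in range(len(text)):
--         for kw, prio in _KEYWORDS:
--             if prio < best and text.startswith(kw, i):
--                 best = prio
--     return _LABELS[best] if best < 6 else "Other"
-- ===== Notes on version B (the rewrite author's own statement) =====
-- stated objective: alternative
-- what changed: Instead of testing each keyword group for substring containment in precedence order, B makes one left-to-right scan over the lowercased text, prefix-matching a flat (keyword, priority) table at every position and keeping the minimal priority, then maps the priority to its label.
import Mathlib
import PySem

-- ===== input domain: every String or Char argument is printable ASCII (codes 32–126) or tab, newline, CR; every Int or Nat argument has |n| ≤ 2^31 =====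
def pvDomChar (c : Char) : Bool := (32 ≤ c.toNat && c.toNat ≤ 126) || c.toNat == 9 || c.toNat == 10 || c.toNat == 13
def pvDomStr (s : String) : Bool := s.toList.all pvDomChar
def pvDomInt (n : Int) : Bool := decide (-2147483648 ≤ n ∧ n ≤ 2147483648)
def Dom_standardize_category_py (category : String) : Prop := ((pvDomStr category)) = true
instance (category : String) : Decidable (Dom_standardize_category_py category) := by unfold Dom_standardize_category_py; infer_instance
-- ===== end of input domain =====

-- B replaces A's keyword-driven substring chain by a single left-to-right scan over the
-- text that prefix-matches a flat (keyword, priority) table at each position and keeps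
-- the minimal priority (alternative algorithm, same behaviour).
-- ===== PORT A =====
def standardize_category_py (category : String) : String :=
  let category := PySem.Str.lower category
  if ["top", "shirt", "blouse", "sweater", "sweatshirt", "t-shirt", "tee", "tank"].any (fun word => PySem.Str.isIn word category) then "Top"
  else if ["bottom", "pant", "jean", "short", "skirt", "trouser"].any (fun word => PySem.Str.isIn word category) then "Bottom"
  else if ["dress", "gown", "jumpsuit", "romper"].any (fun word => PySem.Str.isIn word category) then "Dress"
  else if ["shoe", "sneaker", "boot", "heel", "sandal", "slipper", "loafer"].any (fun word => PySem.Str.isIn word category) then "Shoes"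
  else if ["jacket", "coat", "blazer", "outerwear"].any (fun word => PySem.Str.isIn word category) then "Outerwear"
  else if ["accessory", "jewelry", "watch", "bag", "purse", "scarf", "hat", "belt"].any (fun word => PySem.Str.isIn word category) then "Accessory"
  else "Other"

-- ===== PORT B =====
def pvKeywords : List (String × Nat) :=
  [("top", 0), ("shirt", 0), ("blouse", 0), ("sweater", 0), ("sweatshirt", 0),
   ("t-shirt", 0), ("tee", 0), ("tank", 0),
   ("bottom", 1), ("pant", 1), ("jean", 1), ("short", 1), ("skirt", 1), ("trouser", 1),
   ("dress", 2), ("gown", 2), ("jumpsuit", 2), ("romper", 2),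
   ("shoe", 3), ("sneaker", 3), ("boot", 3), ("heel", 3), ("sandal", 3),
   ("slipper", 3), ("loafer", 3),
   ("jacket", 4), ("coat", 4), ("blazer", 4), ("outerwear", 4),
   ("accessory", 5), ("jewelry", 5), ("watch", 5), ("bag", 5), ("purse", 5),
   ("scarf", 5), ("hat", 5), ("belt", 5)]

def pvLabels : List String := ["Top", "Bottom", "Dress", "Shoes", "Outerwear", "Accessory"]

-- body of Source B's inner loop: `if prio < best and text.startswith(kw, i): best = prio`;
-- `text.startswith(kw, i)` is exact as `kw.toList.isPrefixOf (text.drop i)` for 0 ≤ i ≤ len(text)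
def pvStep (t : List Char) (best : Nat) (kp : String × Nat) : Nat :=
  if kp.2 < best ∧ kp.1.toList.isPrefixOf t then kp.2 else best

def standardize_category_py_alt (category : String) : String :=
  let s := (PySem.Str.lower category).toList
  let best := (List.range s.length).foldl (fun b i => pvKeywords.foldl (pvStep (s.drop i)) b) 6
  if best < 6 then pvLabels.getD best "Other" else "Other"

-- ===== PRECONDITION & SPEC =====
def Spec_standardize_category_py (category : String) (out : String) : Prop := out = standardize_category_py_alt category
instance (category : String) (out : String) : Decidable (Spec_standardize_category_py category out) := by unfold Spec_standardize_category_py; infer_instance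

-- ===== CLAIM (what is proved, stated in full; the proofs are below) =====
def Claim_equal_standardize_category_py : Prop := ∀ (category : String), Dom_standardize_category_py category → Spec_standardize_category_py category (standardize_category_py category)

-- ===== LEMMAS AND PROOFS =====

-- the six keyword groups, in A's precedence order
def pvG0 : List String := ["top", "shirt", "blouse", "sweater", "sweatshirt", "t-shirt", "tee", "tank"]
def pvG1 : List String := ["bottom", "pant", "jean", "short", "skirt", "trouser"]
def pvG2 : List String := ["dress", "gown", "jumpsuit", "romper"]
def pvG3 : List String := ["shoe", "sneaker", "boot", "heel", "sandal", "slipper", "loafer"]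
def pvG4 : List String := ["jacket", "coat", "blazer", "outerwear"]
def pvG5 : List String := ["accessory", "jewelry", "watch", "bag", "purse", "scarf", "hat", "belt"]

theorem pvKeywords_eq : pvKeywords =
    (pvG0.map (fun w => (w, 0))) ++ (pvG1.map (fun w => (w, 1))) ++ (pvG2.map (fun w => (w, 2))) ++
    (pvG3.map (fun w => (w, 3))) ++ (pvG4.map (fun w => (w, 4))) ++ (pvG5.map (fun w => (w, 5))) := by
  rfl

-- "some keyword of the group is a prefix of t"
def pvP (ws : List String) (t : List Char) : Bool := ws.any (fun w => w.toList.isPrefixOf t)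
-- "some keyword of the group occurs in s" (A's condition)
def pvM (ws : List String) (s : List Char) : Bool := ws.any (fun w => PySem.Chars.isIn w.toList s)

-- first-true index among six booleans (6 = none)
def pvChain (b0 b1 b2 b3 b4 b5 : Bool) : Nat :=
  if b0 then 0 else if b1 then 1 else if b2 then 2 else if b3 then 3 else if b4 then 4 else if b5 then 5 else 6

theorem pvChain_le (b0 b1 b2 b3 b4 b5 : Bool) : pvChain b0 b1 b2 b3 b4 b5 ≤ 6 := by
  revert b0 b1 b2 b3 b4 b5; decide

theorem pv_group_fold (ws : List String) (j : Nat) (t : List Char) (b : Nat) :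
    (ws.map (fun w => (w, j))).foldl (pvStep t) b =
    if j < b ∧ pvP ws t then j else b := by
  induction ws generalizing b with
  | nil => simp [pvP]
  | cons w ws ih =>
      by_cases hw : w.toList.isPrefixOf t = true <;> by_cases hb : j < b <;>
        simp [pvStep, pvP, hw, hb, ih, List.any_cons]

set_option maxHeartbeats 1600000 in
theorem pv_inner_eq (t : List Char) (b : Nat) (hb : b ≤ 6) :
    pvKeywords.foldl (pvStep t) b =
    Nat.min b (pvChain (pvP pvG0 t) (pvP pvG1 t) (pvP pvG2 t) (pvP pvG3 t) (pvP pvG4 t) (pvP pvG5 t)) := by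
  rw [pvKeywords_eq]
  simp only [List.foldl_append, pv_group_fold]
  generalize pvP pvG0 t = p0
  generalize pvP pvG1 t = p1
  generalize pvP pvG2 t = p2
  generalize pvP pvG3 t = p3
  generalize pvP pvG4 t = p4
  generalize pvP pvG5 t = p5
  cases p0 <;> cases p1 <;> cases p2 <;> cases p3 <;> cases p4 <;> cases p5 <;>
    simp [pvChain, Nat.min_def] <;> first | omega | (split_ifs <;> omega)

theorem pv_scan_cons (c : Char) (s : List Char) (b : Nat) :
    (List.range (c :: s).length).foldl (fun b i => pvKeywords.foldl (pvStep ((c :: s).drop i)) b) b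
    = (List.range s.length).foldl (fun b i => pvKeywords.foldl (pvStep (s.drop i)) b)
        (pvKeywords.foldl (pvStep (c :: s)) b) := by
  simp [List.range_succ_eq_map, List.foldl_map, List.drop_succ_cons]

theorem pv_scan_min (s : List Char) (b : Nat) (hb : b ≤ 6) :
    (List.range s.length).foldl (fun b i => pvKeywords.foldl (pvStep (s.drop i)) b) b
    = Nat.min b ((List.range s.length).foldl (fun b i => pvKeywords.foldl (pvStep (s.drop i)) b) 6) := by
  induction s generalizing b with
  | nil => simp [Nat.min_def]; omega
  | cons c s ih =>
      rw [pv_scan_cons, pv_scan_cons]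
      have hch : pvChain (pvP pvG0 (c :: s)) (pvP pvG1 (c :: s)) (pvP pvG2 (c :: s))
          (pvP pvG3 (c :: s)) (pvP pvG4 (c :: s)) (pvP pvG5 (c :: s)) ≤ 6 := pvChain_le _ _ _ _ _ _
      have h1 : pvKeywords.foldl (pvStep (c :: s)) b
          = Nat.min b (pvKeywords.foldl (pvStep (c :: s)) 6) := by
        rw [pv_inner_eq _ _ hb, pv_inner_eq _ _ (by omega)]; simp [Nat.min_def]; split_ifs <;> omega
      have h2 : pvKeywords.foldl (pvStep (c :: s)) b ≤ 6 := by
        rw [pv_inner_eq _ _ hb]; simp [Nat.min_def]; split_ifs <;> omega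
      have h3 : pvKeywords.foldl (pvStep (c :: s)) 6 ≤ 6 := by
        rw [pv_inner_eq _ _ (by omega)]; simp [Nat.min_def]; split_ifs <;> omega
      rw [ih _ h2, ih _ h3, h1]
      exact min_assoc b _ _

theorem pv_isIn_cons (w : List Char) (c : Char) (s : List Char) :
    PySem.Chars.isIn w (c :: s) = (w.isPrefixOf (c :: s) || PySem.Chars.isIn w s) := by
  rw [Bool.eq_iff_iff]
  simp [PySem.Chars.isIn_iff_infix, List.infix_cons_iff, List.isPrefixOf_iff_prefix]

theorem pv_M_cons (ws : List String) (c : Char) (s : List Char) :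
    pvM ws (c :: s) = (pvP ws (c :: s) || pvM ws s) := by
  rw [Bool.eq_iff_iff]
  simp only [pvM, pvP, List.any_eq_true, Bool.or_eq_true, pv_isIn_cons]
  constructor
  · rintro ⟨w, hw, h | h⟩
    · exact Or.inl ⟨w, hw, h⟩
    · exact Or.inr ⟨w, hw, h⟩
  · rintro (⟨w, hw, h⟩ | ⟨w, hw, h⟩)
    · exact ⟨w, hw, Or.inl h⟩
    · exact ⟨w, hw, Or.inr h⟩

theorem pv_min_chain (b0 b1 b2 b3 b4 b5 c0 c1 c2 c3 c4 c5 : Bool) :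
    Nat.min (Nat.min 6 (pvChain b0 b1 b2 b3 b4 b5)) (pvChain c0 c1 c2 c3 c4 c5)
    = pvChain (b0 || c0) (b1 || c1) (b2 || c2) (b3 || c3) (b4 || c4) (b5 || c5) := by
  revert b0 b1 b2 b3 b4 b5 c0 c1 c2 c3 c4 c5; decide

theorem pv_scan_eq_chain (s : List Char) :
    (List.range s.length).foldl (fun b i => pvKeywords.foldl (pvStep (s.drop i)) b) 6
    = pvChain (pvM pvG0 s) (pvM pvG1 s) (pvM pvG2 s) (pvM pvG3 s) (pvM pvG4 s) (pvM pvG5 s) := by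
  induction s with
  | nil => decide
  | cons c s ih =>
      rw [pv_scan_cons, pv_scan_min _ _ (by rw [pv_inner_eq _ _ (by omega)]; exact Nat.min_le_left 6 _), ih, pv_inner_eq _ _ (by omega),
        pv_min_chain, ← pv_M_cons, ← pv_M_cons, ← pv_M_cons, ← pv_M_cons, ← pv_M_cons, ← pv_M_cons]

theorem pv_final (m0 m1 m2 m3 m4 m5 : Bool) :
    (if m0 then "Top" else if m1 then "Bottom" else if m2 then "Dress" else if m3 then "Shoes"
     else if m4 then "Outerwear" else if m5 then "Accessory" else "Other")
    = (if pvChain m0 m1 m2 m3 m4 m5 < 6 then pvLabels.getD (pvChain m0 m1 m2 m3 m4 m5) "Other" else "Other") := by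
  revert m0 m1 m2 m3 m4 m5; decide

-- ===== VERDICT (by name: the statement is the Claim_ definition above) =====
theorem standardize_category_py_spec : Claim_equal_standardize_category_py := by
  intro category _
  unfold Spec_standardize_category_py standardize_category_py standardize_category_py_alt
  simp only [PySem.Str.isIn_eq]
  rw [pv_scan_eq_chain]
  exact pv_final _ _ _ _ _ _
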